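-- pv_equiv track=rewrite | github.com/dev-lake/yt-dlp-api | main.py | NormalizeString
-- ===== SOURCE A (Python) =====
-- def NormalizeString(s: str, max_length: int = 200) -> str:
--     """
--     去掉头尾的空格， 所有特殊字符转换成 _，并限制长度
--     """
--     s = s.strip()
--     # 替换特殊字符
--     special_chars = ['/', '\\', ':', '*', '?', '"', '<', '>', '|']
--     for char in special_chars:
--         s = s.replace(char, '_')
--
--     # 限制长度，如果超长则截断并保持可读性
--     if len(s) > max_length:
--         # 保留前面的内容，并在末尾添加省略标记
--         s = s[:max_length-3] + "..."
--
--     return s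
-- ===== SOURCE B (Python) =====
-- _SPECIAL = set('/\\:*?"<>|')
--
-- def NormalizeString(s: str, max_length: int = 200) -> str:
--     s = ''.join('_' if c in _SPECIAL else c for c in s.strip())
--     if len(s) > max_length:
--         s = s[:max_length-3] + "..."
--     return s
-- ===== Notes on version B (the rewrite author's own statement) =====
-- stated objective: idiomatic
-- what changed: Replaced A's nine sequential str.replace passes over the whole string with a single pass that maps each character through a membership test against a set of disallowed characters; the truncation step is kept exactly.
import Mathlib
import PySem

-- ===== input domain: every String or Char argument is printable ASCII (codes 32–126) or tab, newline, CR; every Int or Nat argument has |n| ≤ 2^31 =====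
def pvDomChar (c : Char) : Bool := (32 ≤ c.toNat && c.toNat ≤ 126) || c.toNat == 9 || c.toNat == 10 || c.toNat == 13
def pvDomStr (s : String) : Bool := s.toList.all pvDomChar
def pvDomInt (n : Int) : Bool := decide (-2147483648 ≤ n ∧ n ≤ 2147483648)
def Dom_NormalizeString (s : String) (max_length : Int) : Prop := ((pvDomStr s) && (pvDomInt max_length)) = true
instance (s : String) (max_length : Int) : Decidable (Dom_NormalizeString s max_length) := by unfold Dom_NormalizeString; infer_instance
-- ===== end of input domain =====

-- B replaces A's nine sequential replace passes with one map over the stripped string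
-- driven by membership in a set of the disallowed characters (objective: idiomatic).

-- ===== PORT A =====
-- special_chars = ['/', '\\', ':', '*', '?', '"', '<', '>', '|']
def pvSpecialChars : List String := ["/", "\\", ":", "*", "?", "\"", "<", ">", "|"]

def NormalizeString (s : String) (max_length : Int) : String :=
  let s1 := PySem.Str.strip s
  let s2 := pvSpecialChars.foldl (fun t c => PySem.Str.replace t c "_") s1
  if (PySem.Str.len s2 > max_length) then
    -- s = s[:max_length-3] + "..."
    String.ofList ((PySem.Str.slice s2 none (some (max_length - 3))).toList ++ "...".toList)
  else s2

-- ===== PORT B =====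
-- _SPECIAL = set('/\\:*?"<>|')
def pvSpecialSet : PySem.Set Char := PySem.Set.ofList "/\\:*?\"<>|".toList

def NormalizeString_alt (s : String) (max_length : Int) : String :=
  let u := (PySem.Chars.strip s.toList).map
             (fun c => if PySem.Set.contains pvSpecialSet c then '_' else c)
  if ((u.length : Int) > max_length) then
    String.ofList (PySem.List.slice u none (some (max_length - 3)) ++ "...".toList)
  else String.ofList u

-- ===== PRECONDITION & SPEC =====
def Spec_NormalizeString (s : String) (max_length : Int) (out : String) : Prop := out = NormalizeString_alt s max_length
instance (s : String) (max_length : Int) (out : String) : Decidable (Spec_NormalizeString s max_length out) := by unfold Spec_NormalizeString; infer_instance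

-- ===== CLAIM (what is proved, stated in full; the proofs are below) =====
def Claim_equal_NormalizeString : Prop := ∀ (s : String) (max_length : Int), Dom_NormalizeString s max_length → Spec_NormalizeString s max_length (NormalizeString s max_length)

-- ===== LEMMAS AND PROOFS =====

-- single-character replace is a pointwise map
lemma replace_go_single (a b : Char) :
    ∀ (l : List Char) (fuel : Nat) (acc : List Char), l.length ≤ fuel →
      PySem.Chars.replace.go [a] [b] fuel l acc
        = acc.reverse ++ l.map (fun c => if c = a then b else c) := by
  intro l
  induction l with
  | nil =>
      intro fuel acc _
      cases fuel <;> simp [PySem.Chars.replace.go]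
  | cons c t ih =>
      intro fuel acc hle
      cases fuel with
      | zero => simp at hle
      | succ n =>
          have ht : t.length ≤ n := by simpa using hle
          by_cases h : c = a
          · subst h
            have step : PySem.Chars.replace.go [c] [b] (n+1) (c :: t) acc
                = PySem.Chars.replace.go [c] [b] n t ([b].reverse ++ acc) := by
              simp [PySem.Chars.replace.go, List.isPrefixOf]
            rw [step, ih n _ ht]
            simp
          · have step : PySem.Chars.replace.go [a] [b] (n+1) (c :: t) acc
                = PySem.Chars.replace.go [a] [b] n t (c :: acc) := by
              simp [PySem.Chars.replace.go, List.isPrefixOf,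
                    show ¬(a = c) from fun hh => h hh.symm]
            rw [step, ih n _ ht]
            simp [h]

lemma replace_single (cs : List Char) (a b : Char) :
    PySem.Chars.replace cs [a] [b] = cs.map (fun c => if c = a then b else c) := by
  simp only [PySem.Chars.replace, List.isEmpty_cons, Bool.false_eq_true]
  simpa using replace_go_single a b cs cs.length [] le_rfl

-- the nine composed single-character maps agree pointwise with the set-membership map
lemma chain_eq_mem (c : Char) :
    (fun x => if x = '|' then '_' else x)
      ((fun x => if x = '>' then '_' else x)
        ((fun x => if x = '<' then '_' else x)
          ((fun x => if x = '"' then '_' else x)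
            ((fun x => if x = '?' then '_' else x)
              ((fun x => if x = '*' then '_' else x)
                ((fun x => if x = ':' then '_' else x)
                  ((fun x => if x = '\\' then '_' else x)
                    ((fun x => if x = '/' then '_' else x) c))))))))
      = if PySem.Set.contains pvSpecialSet c then '_' else c := by
  rcases eq_or_ne c '/' with h | h1; · subst h; decide
  rcases eq_or_ne c '\\' with h | h2; · subst h; decide
  rcases eq_or_ne c ':' with h | h3; · subst h; decide
  rcases eq_or_ne c '*' with h | h4; · subst h; decide
  rcases eq_or_ne c '?' with h | h5; · subst h; decide
  rcases eq_or_ne c '"' with h | h6; · subst h; decide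
  rcases eq_or_ne c '<' with h | h7; · subst h; decide
  rcases eq_or_ne c '>' with h | h8; · subst h; decide
  rcases eq_or_ne c '|' with h | h9; · subst h; decide
  have hmem : PySem.Set.contains pvSpecialSet c = false := by
    have e : pvSpecialSet = ['/','\\',':','*','?','"','<','>','|'] := rfl
    rw [e]
    simp [PySem.Set.contains, List.contains_eq_mem, h1, h2, h3, h4, h5, h6, h7, h8, h9]
  rw [hmem]
  simp [h1, h2, h3, h4, h5, h6, h7, h8, h9]

-- A's replace chain, on the char-list side, is B's map
lemma foldl_replace_eq_map (cs : List Char) :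
    (pvSpecialChars.foldl (fun t c => PySem.Str.replace t c "_") (String.ofList cs)).toList
      = cs.map (fun c => if PySem.Set.contains pvSpecialSet c then '_' else c) := by
  simp only [pvSpecialChars, List.foldl, PySem.Str.replace, String.toList_ofList]
  simp only [show ("/").toList = ['/'] from rfl, show ("\\").toList = ['\\'] from rfl,
    show (":").toList = [':'] from rfl, show ("*").toList = ['*'] from rfl,
    show ("?").toList = ['?'] from rfl, show ("\"").toList = ['"'] from rfl,
    show ("<").toList = ['<'] from rfl, show (">").toList = ['>'] from rfl,
    show ("|").toList = ['|'] from rfl, show ("_").toList = ['_'] from rfl]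
  simp only [replace_single]
  induction cs with
  | nil => simp
  | cons c t ih =>
      simp only [List.map_cons, List.cons.injEq]
      exact ⟨chain_eq_mem c, ih⟩

-- ===== VERDICT (by name: the statement is the Claim_ definition above) =====
theorem NormalizeString_spec : Claim_equal_NormalizeString := by
  intro s max_length _hdom
  unfold Spec_NormalizeString NormalizeString NormalizeString_alt
  have hs : PySem.Str.strip s = String.ofList (PySem.Chars.strip s.toList) := by
    apply String.toList_injective; simp
  have key : (pvSpecialChars.foldl (fun t c => PySem.Str.replace t c "_")
                (PySem.Str.strip s)).toList
      = (PySem.Chars.strip s.toList).map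
          (fun c => if PySem.Set.contains pvSpecialSet c then '_' else c) := by
    rw [hs, foldl_replace_eq_map]
  rw [← key]
  simp only [PySem.Str.len_eq, PySem.Str.toList_slice, PySem.Chars.slice_eq_listSlice,
    String.ofList_toList]
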